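-- pv_equiv track=rewrite | github.com/lishuwnc/Kickstart-Framework-Python | archive/A2018.py | solveAA2018
-- ===== SOURCE A (Python) =====
-- def solveAA2018(n):
--     res = 0
--     i = 0
--     t = 0
--     m = -1
--     while n > 0:
--         v = n % 10
--         t = t + v * (10 ** i)
--         n //= 10
--         if v % 2 > 0:
--             m = i
--         i += 1
--     if m < 0:
--         res = 0
--     else:
--         v = (t // 10 ** m) % 10
--         if v == 9:
--             res = t % (10 ** m) + 1 + int('1' * m if m > 0 else '0')
--         else:
--             res = min(t % (10 ** m) + 1 + int('1' * m if m > 0 else '0'), 10 ** m - (t % (10 ** m)))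
--     return res
-- ===== SOURCE B (Python) =====
-- def _odd_pos(n):
--     """Highest decimal position of an odd digit of n, or None (n <= 0 -> None)."""
--     if n <= 0:
--         return None
--     r = _odd_pos(n // 10)
--     if r is not None:
--         return r + 1
--     return 0 if n % 10 % 2 == 1 else None
--
--
-- def solveAA2018(n):
--     if n <= 0:
--         return 0
--     pos = _odd_pos(n)
--     if pos is None:
--         return 0
--     p = 10 ** pos
--     lower = n % p
--     cand = lower + 1 + (p - 1) // 9
--     if n // p % 10 == 9:
--         return cand
--     return min(cand, p - lower)
-- ===== Notes on version B (the rewrite author's own statement) =====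
-- stated objective: simpler
-- what changed: Replaces A's single iterative digit loop that rebuilds the number t with running power i and tracks the last odd position m by a recursive helper returning the highest odd-digit position directly, and replaces int('1'*m) string building by the closed-form repunit (10**m-1)//9.
import Mathlib
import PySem

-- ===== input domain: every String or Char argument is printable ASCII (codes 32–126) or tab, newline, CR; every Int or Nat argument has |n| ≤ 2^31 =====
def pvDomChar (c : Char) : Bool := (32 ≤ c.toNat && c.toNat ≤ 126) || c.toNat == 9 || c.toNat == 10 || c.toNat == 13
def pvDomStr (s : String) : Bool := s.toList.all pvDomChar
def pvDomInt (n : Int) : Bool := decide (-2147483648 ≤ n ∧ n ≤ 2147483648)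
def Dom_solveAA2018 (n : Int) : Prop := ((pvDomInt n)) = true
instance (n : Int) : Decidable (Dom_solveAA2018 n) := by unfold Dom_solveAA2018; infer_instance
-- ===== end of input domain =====

-- B replaces A's digit loop (rebuilding t, running power i, last odd position m) by a
-- recursive highest-odd-digit-position helper and the closed-form repunit (10^m-1)//9: simpler.

-- ===== PORT A =====
-- while n > 0: v = n % 10; t += v * 10**i; n //= 10; if v % 2 > 0: m = i; i += 1
-- (res is only assigned after the loop; loop state is (i, t, m); i ≥ 0 always, so 10**i = 10^i.toNat)
def loopA_solveAA2018 (n i t m : Int) : Int × Int × Int :=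
  if h : n > 0 then
    let v := PySem.Int.mod n 10
    loopA_solveAA2018 (PySem.Int.floordiv n 10) (i + 1) (t + v * 10 ^ i.toNat)
      (if PySem.Int.mod v 2 > 0 then i else m)
  else (i, t, m)
termination_by n.toNat
decreasing_by
  rw [PySem.Int.floordiv_eq_ediv_of_pos (by norm_num)]
  omega

def solveAA2018 (n : Int) : Int :=
  let s := loopA_solveAA2018 n 0 0 (-1)
  let t := s.2.1
  let m := s.2.2
  if m < 0 then 0
  else
    -- here m ≥ 0, so Python's 10 ** m is 10^m.toNat; int('1'*m) never raises (digit string),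
    -- so .getD 0 is exact
    let v := PySem.Int.mod (PySem.Int.floordiv t (10 ^ m.toNat)) 10
    let rep := (PySem.Int.ofStr? (if m > 0 then String.ofList (List.replicate m.toNat '1') else "0")).getD 0
    if v = 9 then PySem.Int.mod t (10 ^ m.toNat) + 1 + rep
    else min (PySem.Int.mod t (10 ^ m.toNat) + 1 + rep) (10 ^ m.toNat - PySem.Int.mod t (10 ^ m.toNat))

-- ===== PORT B =====
-- recursive helper: highest decimal position of an odd digit of n, or none
def oddPos_solveAA2018 (n : Int) : Option Int :=
  if h : n ≤ 0 then none
  else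
    match oddPos_solveAA2018 (PySem.Int.floordiv n 10) with
    | some r => some (r + 1)
    | none => if PySem.Int.mod (PySem.Int.mod n 10) 2 = 1 then some 0 else none
termination_by n.toNat
decreasing_by
  rw [PySem.Int.floordiv_eq_ediv_of_pos (by norm_num)]
  omega

def solveAA2018_alt (n : Int) : Int :=
  if n ≤ 0 then 0
  else
    match oddPos_solveAA2018 n with
    | none => 0
    | some pos =>
      -- pos ≥ 0 by construction, so 10 ** pos = 10^pos.toNat
      let p : Int := 10 ^ pos.toNat
      let lower := PySem.Int.mod n p
      let cand := lower + 1 + PySem.Int.floordiv (p - 1) 9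
      if PySem.Int.mod (PySem.Int.floordiv n p) 10 = 9 then cand
      else min cand (p - lower)

-- ===== PRECONDITION & SPEC =====
def Spec_solveAA2018 (n : Int) (out : Int) : Prop := out = solveAA2018_alt n
instance (n : Int) (out : Int) : Decidable (Spec_solveAA2018 n out) := by unfold Spec_solveAA2018; infer_instance

-- ===== CLAIM (what is proved, stated in full; the proofs are below) =====
def Claim_equal_solveAA2018 : Prop := ∀ (n : Int), Dom_solveAA2018 n → Spec_solveAA2018 n (solveAA2018 n)

-- ===== LEMMAS AND PROOFS =====

-- A's loop, seen through B's helper: final t is t + n*10^i, final m is i + oddPos n (or m).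
theorem loopA_snd_aux (N : Nat) : ∀ (n : Int), n.toNat ≤ N → 0 ≤ n → ∀ (i t m : Int), 0 ≤ i →
      (loopA_solveAA2018 n i t m).2 =
        (t + n * 10 ^ i.toNat,
         match oddPos_solveAA2018 n with
         | some k => i + k
         | none => m) := by
  induction N with
  | zero =>
    intro n hN hn i t m hi
    have hn0 : n = 0 := by omega
    subst hn0
    rw [loopA_solveAA2018, oddPos_solveAA2018]
    norm_num
  | succ N ih =>
    intro n hN hn i t m hi
    by_cases hpos : n > 0
    · have hdiv : PySem.Int.floordiv n 10 = n / 10 :=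
        PySem.Int.floordiv_eq_ediv_of_pos (by norm_num)
      have hmod : PySem.Int.mod n 10 = n % 10 :=
        PySem.Int.mod_eq_emod_of_pos (by norm_num)
      rw [loopA_solveAA2018]
      simp only [hpos, dite_true, hdiv, hmod]
      rw [ih (n / 10) (by omega) (by omega) (i + 1) _ _ (by omega)]
      have hsum : n % 10 + 10 * (n / 10) = n := Int.emod_add_ediv n 10
      have hiN : (i + 1).toNat = i.toNat + 1 := by omega
      have hmod2 : PySem.Int.mod (n % 10) 2 = (n % 10) % 2 :=
        PySem.Int.mod_eq_emod_of_pos (by norm_num)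
      conv_rhs => rw [oddPos_solveAA2018]
      simp only [show ¬ n ≤ 0 by omega, dite_false, hdiv, hmod, hmod2]
      rw [Prod.mk.injEq]
      constructor
      · rw [hiN]
        ring_nf
        linear_combination (10 : Int) ^ i.toNat * hsum
      · rcases h : oddPos_solveAA2018 (n / 10) with _ | r
        · by_cases hodd : (n % 10) % 2 = 1
          · simp [hodd]
          · have h0 : (n % 10) % 2 = 0 := by omega
            simp [h0]
        · simp only []
          ring
    · have hn0 : n = 0 := by omega
      subst hn0
      rw [loopA_solveAA2018, oddPos_solveAA2018]
      norm_num

theorem loopA_snd (n : Int) (hn : 0 ≤ n) (i t m : Int) (hi : 0 ≤ i) :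
    (loopA_solveAA2018 n i t m).2 =
      (t + n * 10 ^ i.toNat,
       match oddPos_solveAA2018 n with
       | some k => i + k
       | none => m) :=
  loopA_snd_aux n.toNat n le_rfl hn i t m hi

theorem oddPos_bound_aux (N : Nat) : ∀ (n : Int), n.toNat ≤ N →
    ∀ k, oddPos_solveAA2018 n = some k → 0 ≤ k ∧ (10 : Int) ^ k.toNat ≤ n := by
  induction N with
  | zero =>
    intro n hN k hk
    rw [oddPos_solveAA2018] at hk
    by_cases hn : n ≤ 0
    · simp [hn] at hk
    · omega
  | succ N ih =>
    intro n hN k hk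
    rw [oddPos_solveAA2018] at hk
    by_cases hn : n ≤ 0
    · simp [hn] at hk
    · have hdiv : PySem.Int.floordiv n 10 = n / 10 :=
        PySem.Int.floordiv_eq_ediv_of_pos (by norm_num)
      simp only [hn, dite_false, hdiv] at hk
      rcases h : oddPos_solveAA2018 (n / 10) with _ | r
      · rw [h] at hk
        by_cases hodd : PySem.Int.mod (PySem.Int.mod n 10) 2 = 1
        · rw [if_pos hodd, Option.some.injEq] at hk
          subst hk
          refine ⟨le_rfl, ?_⟩
          norm_num
          omega
        · rw [if_neg hodd] at hk
          exact absurd hk (by simp)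
      · rw [h] at hk
        simp only [Option.some.injEq] at hk
        obtain ⟨hr0, hrle⟩ := ih (n / 10) (by omega) r h
        subst hk
        refine ⟨by omega, ?_⟩
        have hN10 : (r + 1).toNat = r.toNat + 1 := by omega
        rw [hN10, pow_succ]
        have := Int.emod_nonneg n (by norm_num : (10:Int) ≠ 0)
        have := Int.emod_add_ediv n 10
        nlinarith

-- ===== VERDICT (by name: the statement is the Claim_ definition above) =====
theorem oddPos_bound (n k : Int) (h : oddPos_solveAA2018 n = some k) :
    0 ≤ k ∧ (10 : Int) ^ k.toNat ≤ n :=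
  oddPos_bound_aux n.toNat n le_rfl k h

theorem loopA_init (n : Int) (hn : 0 ≤ n) :
    (loopA_solveAA2018 n 0 0 (-1)).2 =
      (n, match oddPos_solveAA2018 n with | some k => k | none => (-1 : Int)) := by
  rw [loopA_snd n hn 0 0 (-1) le_rfl]
  rcases oddPos_solveAA2018 n with _ | k <;> norm_num

theorem solveAA2018_spec : Claim_equal_solveAA2018 := by
  intro n hdom
  unfold Spec_solveAA2018
  by_cases hn : n ≤ 0
  · unfold solveAA2018
    rw [loopA_solveAA2018]
    simp [show ¬ n > 0 by omega, solveAA2018_alt, hn]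
  · have hn0 : 0 ≤ n := by omega
    have hloop := loopA_init n hn0
    rcases h : oddPos_solveAA2018 n with _ | k
    · rw [h] at hloop
      simp only [solveAA2018, solveAA2018_alt, hloop, h, hn, if_false]
      norm_num
    · rw [h] at hloop
      obtain ⟨hk0, hkle⟩ := oddPos_bound n k h
      have hb : n ≤ 2147483648 := by
        unfold Dom_solveAA2018 pvDomInt at hdom
        simp only [decide_eq_true_eq] at hdom
        omega
      have hk9 : k ≤ 9 := by
        by_contra hgt
        have h10 : (10 : Int) ^ 10 ≤ (10 : Int) ^ k.toNat := by
          apply pow_le_pow_right₀ (by norm_num)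
          omega
        norm_num at h10
        omega
      have hrep : (PySem.Int.ofStr? (if k > 0 then String.ofList (List.replicate k.toNat '1') else "0")).getD 0
          = PySem.Int.floordiv ((10 : Int) ^ k.toNat - 1) 9 := by
        interval_cases k <;> decide
      simp only [solveAA2018, solveAA2018_alt, hloop, h, hn, if_false]
      rw [if_neg (by omega : ¬ k < 0), hrep]
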